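-- pv_equiv track=rewrite | github.com/DBeewms/Calculadora-Web-Algebra-Lineal | algebra/logic/utilidades.py | potencia_fraccion
-- ===== SOURCE A (Python) =====
-- def mcd(a, b):
--     a = a if a >= 0 else -a
--     b = b if b >= 0 else -b
--     while b != 0:
--         resto = a % b
--         a = b
--         b = resto
--     return a
--
-- def simplificar_fraccion(numerador, denominador):
--     if denominador == 0:
--         raise Exception("Denominador cero.")
--     if denominador < 0:
--         numerador = -numerador
--         denominador = -denominador
--     divisor = mcd(numerador, denominador)
--     num_s = numerador // divisor
--     den_s = denominador // divisor
--     return [num_s, den_s]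
--
-- def potencia_fraccion(a, e: int):
--     if e == 0:
--         return [1, 1]
--     base_n, base_d = a[0], a[1]
--     if e < 0:
--         e = -e
--         base_n, base_d = base_d, base_n
--         if base_d == 0:
--             raise Exception('División por cero en potencia negativa')
--     # exponenciación entera
--     n = 1
--     d = 1
--     i = 0
--     while i < e:
--         n *= base_n
--         d *= base_d
--         i += 1
--     return simplificar_fraccion(n, d)
-- ===== SOURCE B (Python) =====
-- def _gcd(x, y):
--     # recursive Euclid on non-negative ints
--     return x if y == 0 else _gcd(y, x % y)
--
-- def potencia_fraccion(a, e: int):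
--     if e == 0:
--         return [1, 1]
--     n, d = (a[0], a[1]) if e > 0 else (a[1], a[0])
--     if d == 0:
--         raise Exception('Denominador cero en la potencia')
--     k = abs(e)
--     # reduce the BASE fraction once (small gcd), then power the reduced parts:
--     # gcd(n**k, d**k) == gcd(n, d)**k, so the result is already in lowest terms
--     g = _gcd(n if n >= 0 else -n, d if d >= 0 else -d)
--     n1, d1 = n // g, d // g
--     N, D = pow(n1, k), pow(d1, k)
--     return [-N, -D] if D < 0 else [N, D]
-- ===== Notes on version B (the rewrite author's own statement) =====
-- stated objective: faster
-- what changed: Instead of multiplying numerator and denominator e times and then taking a gcd of the huge results, B reduces the base fraction once with a gcd of the (small) inputs and raises the reduced parts with Python's built-in pow, using gcd(n^k, d^k) = gcd(n,d)^k so the result is already in lowest terms.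
import Mathlib
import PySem

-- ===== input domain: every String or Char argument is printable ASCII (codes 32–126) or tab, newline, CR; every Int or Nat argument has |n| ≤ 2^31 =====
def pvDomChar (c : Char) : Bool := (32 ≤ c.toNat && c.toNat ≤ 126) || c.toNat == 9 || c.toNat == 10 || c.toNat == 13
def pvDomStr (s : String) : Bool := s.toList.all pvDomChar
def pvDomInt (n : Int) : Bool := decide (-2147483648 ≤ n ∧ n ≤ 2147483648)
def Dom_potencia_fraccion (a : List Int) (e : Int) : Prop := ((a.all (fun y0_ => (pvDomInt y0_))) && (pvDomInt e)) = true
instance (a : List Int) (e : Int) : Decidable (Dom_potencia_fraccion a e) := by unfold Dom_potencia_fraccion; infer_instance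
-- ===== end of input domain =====

-- B reduces the base fraction with one small gcd and raises the reduced parts by
-- fast exponentiation, instead of A's e multiplications followed by a gcd of the huge results.

-- Python's `x % y` (sign of the divisor) leaves a remainder strictly smaller in absolute value (y ≠ 0);
-- used by the ports' Euclid loops for termination.
theorem pyMod_natAbs_lt (a b : Int) (hb : b ≠ 0) : (PySem.Int.mod a b).natAbs < b.natAbs := by
  rcases lt_or_gt_of_ne hb with h | h
  · have h2 := PySem.Int.mod_neg_bounds a h
    omega
  · have h1 := PySem.Int.mod_nonneg a h
    have h2 := PySem.Int.mod_lt a h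
    omega

-- ===== PORT A =====
-- while b != 0: resto = a % b; a = b; b = resto
def mcdLoop (a b : Int) : Int :=
  if hb : b ≠ 0 then mcdLoop b (PySem.Int.mod a b) else a
termination_by b.natAbs
decreasing_by exact pyMod_natAbs_lt a b hb

def mcd (a b : Int) : Int :=
  mcdLoop (if a ≥ 0 then a else -a) (if b ≥ 0 then b else -b)

-- simplificar_fraccion; the `denominador == 0` branch raises in Python (outside Pre_), ported as []
def simplificar_fraccion (numerador denominador : Int) : List Int :=
  if denominador = 0 then []
  else
    let num := if denominador < 0 then -numerador else numerador
    let den := if denominador < 0 then -denominador else denominador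
    let divisor := mcd num den
    [PySem.Int.floordiv num divisor, PySem.Int.floordiv den divisor]

-- while i < e: n *= base_n; d *= base_d; i += 1
def pfLoop (bn bd e n d i : Int) : Int × Int :=
  if i < e then pfLoop bn bd e (n * bn) (d * bd) (i + 1) else (n, d)
termination_by (e - i).toNat
decreasing_by omega

def potencia_fraccion (a : List Int) (e : Int) : List Int :=
  if e = 0 then [1, 1]
  else
    let bn := PySem.List.pyGetD a 0 0   -- a[0] (IndexError outside Pre_)
    let bd := PySem.List.pyGetD a 1 0   -- a[1]
    let bn' := if e < 0 then bd else bn -- the e < 0 branch swaps and negates e;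
    let bd' := if e < 0 then bn else bd -- its `raise` on base_d == 0 is outside Pre_
    let e' := if e < 0 then -e else e
    let p := pfLoop bn' bd' e' 1 1 0
    simplificar_fraccion p.1 p.2

-- ===== PORT B =====
-- recursive Euclid: return x if y == 0 else _gcd(y, x % y)
def gcdRec (x y : Int) : Int :=
  if hy : y = 0 then x else gcdRec y (PySem.Int.mod x y)
termination_by y.natAbs
decreasing_by exact pyMod_natAbs_lt x y hy

def potencia_fraccion_alt (a : List Int) (e : Int) : List Int :=
  if e = 0 then [1, 1]
  else
    let n := if e > 0 then PySem.List.pyGetD a 0 0 else PySem.List.pyGetD a 1 0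
    let d := if e > 0 then PySem.List.pyGetD a 1 0 else PySem.List.pyGetD a 0 0
    if d = 0 then []   -- Python raises here (outside Pre_)
    else
      let k := e.natAbs                 -- abs(e)
      let g := gcdRec (if n ≥ 0 then n else -n) (if d ≥ 0 then d else -d)
      let n1 := PySem.Int.floordiv n g
      let d1 := PySem.Int.floordiv d g
      let N := n1 ^ k                   -- pow(n1, k)
      let D := d1 ^ k                   -- pow(d1, k)
      if D < 0 then [-N, -D] else [N, D]

-- ===== PRECONDITION & SPEC =====
-- Pre_ excludes exactly the inputs where A raises: a shorter-than-2 list with e ≠ 0 (IndexError),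
-- a zero denominator a[1] with e > 0, and a zero numerator a[0] with e < 0 (division by zero).
def Pre_potencia_fraccion (a : List Int) (e : Int) : Prop :=
  e ≠ 0 → 2 ≤ a.length ∧ (0 < e → a.getD 1 0 ≠ 0) ∧ (e < 0 → a.getD 0 0 ≠ 0)
instance (a : List Int) (e : Int) : Decidable (Pre_potencia_fraccion a e) := by
  unfold Pre_potencia_fraccion; infer_instance

def pvWitness_potencia_fraccion : List Int × Int := ([6, -4], 3)

def Spec_potencia_fraccion (a : List Int) (e : Int) (out : List Int) : Prop := out = potencia_fraccion_alt a e
instance (a : List Int) (e : Int) (out : List Int) : Decidable (Spec_potencia_fraccion a e out) := by unfold Spec_potencia_fraccion; infer_instance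

-- ===== CLAIM (what is proved, stated in full; the proofs are below) =====
def Claim_equal_potencia_fraccion : Prop := ∀ (a : List Int) (e : Int), Dom_potencia_fraccion a e → Pre_potencia_fraccion a e → Spec_potencia_fraccion a e (potencia_fraccion a e)

-- ===== LEMMAS AND PROOFS =====

-- A's Euclid loop and B's recursive Euclid are the same recursion
theorem mcdLoop_eq_gcdRec_aux : ∀ (N : Nat) (x y : Int), y.natAbs ≤ N → mcdLoop x y = gcdRec x y := by
  intro N
  induction N with
  | zero =>
      intro x y h
      have hy : y = 0 := by omega
      rw [mcdLoop, gcdRec]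
      simp [hy]
  | succ m ih =>
      intro x y h
      rw [mcdLoop, gcdRec]
      by_cases hy : y = 0
      · simp [hy]
      · simp only [ne_eq, hy, not_false_eq_true, dite_true, dite_false]
        exact ih y (PySem.Int.mod x y) (by have := pyMod_natAbs_lt x y hy; omega)

theorem mcdLoop_eq_gcdRec (x y : Int) : mcdLoop x y = gcdRec x y :=
  mcdLoop_eq_gcdRec_aux y.natAbs x y le_rfl

theorem gcdRec_eq_gcd_aux : ∀ (N : Nat) (x y : Int), y.natAbs ≤ N → 0 ≤ x → 0 ≤ y →
    gcdRec x y = (Int.gcd x y : Int) := by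
  intro N
  induction N with
  | zero =>
      intro x y h hx hy0
      have hy : y = 0 := by omega
      rw [gcdRec]
      simp [hy, Int.gcd, Int.natAbs_of_nonneg hx]
  | succ m ih =>
      intro x y h hx hy0
      rw [gcdRec]
      by_cases hy : y = 0
      · simp [hy, Int.gcd, Int.natAbs_of_nonneg hx]
      · have hypos : 0 < y := lt_of_le_of_ne hy0 (Ne.symm hy)
        have hmod : PySem.Int.mod x y = x % y := PySem.Int.mod_eq_emod_of_pos hypos
        simp only [hy, dite_false]
        rw [ih y (PySem.Int.mod x y) (by have := pyMod_natAbs_lt x y hy; omega) hy0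
            (by rw [hmod]; exact Int.emod_nonneg x hy)]
        rw [hmod, Int.gcd_comm, Int.gcd_emod]

theorem gcdRec_eq_gcd (x y : Int) (hx : 0 ≤ x) (hy : 0 ≤ y) : gcdRec x y = (Int.gcd x y : Int) :=
  gcdRec_eq_gcd_aux y.natAbs x y le_rfl hx hy

-- B's gcd call on |n|, |d| written as conditionals
theorem gcdRec_abs_eq_gcd (x y : Int) :
    gcdRec (if x ≥ 0 then x else -x) (if y ≥ 0 then y else -y) = (Int.gcd x y : Int) := by
  have h := gcdRec_eq_gcd (if x ≥ 0 then x else -x) (if y ≥ 0 then y else -y)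
    (by split <;> omega) (by split <;> omega)
  rw [h]
  congr 1
  rcases le_or_gt 0 x with hx | hx <;> rcases le_or_gt 0 y with hy | hy
  · simp [hx, hy]
  · simp [hx, show ¬ y ≥ 0 by omega, Int.gcd_neg]
  · simp [hy, show ¬ x ≥ 0 by omega, Int.neg_gcd]
  · simp [show ¬ x ≥ 0 by omega, show ¬ y ≥ 0 by omega, Int.neg_gcd, Int.gcd_neg]

theorem mcd_eq_gcd (x y : Int) : mcd x y = (Int.gcd x y : Int) := by
  rw [mcd, mcdLoop_eq_gcdRec, gcdRec_abs_eq_gcd]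

theorem pfLoop_eq_pow (bn bd : Int) (k : Nat) :
    ∀ (e n d i : Int), e - i = (k : Int) →
      pfLoop bn bd e n d i = (n * bn ^ k, d * bd ^ k) := by
  induction k with
  | zero => intro e n d i h; rw [pfLoop]; simp [show ¬ i < e by omega]
  | succ m ih =>
      intro e n d i h
      rw [pfLoop]
      rw [if_pos (by omega), ih e (n * bn) (d * bd) (i + 1) (by omega)]
      rw [Prod.mk.injEq]
      constructor <;> ring

-- the algebraic core: simplifying (n^k, d^k) = powering the reduced (n/g, d/g)
theorem core_aux (G : Nat) (hGpos : 0 < G) (n1 d1 : Int) (hd1 : d1 ≠ 0)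
    (hcop : Int.gcd n1 d1 = 1) (k : Nat) :
    simplificar_fraccion (((G : Int) * n1) ^ k) (((G : Int) * d1) ^ k) =
      (if d1 ^ k < 0 then [-(n1 ^ k), -(d1 ^ k)] else [n1 ^ k, d1 ^ k]) := by
  have hGp : (0 : Int) < (G : Int) := by exact_mod_cast hGpos
  have hGk : (0 : Int) < (G : Int) ^ k := pow_pos hGp k
  have hdne : ((G : Int) * d1) ^ k ≠ 0 :=
    pow_ne_zero k (mul_ne_zero (ne_of_gt hGp) hd1)
  have hgk : Int.gcd (((G : Int) * n1) ^ k) (((G : Int) * d1) ^ k) = G ^ k := by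
    rw [mul_pow, mul_pow, Int.gcd_mul_left]
    have h1 : Int.gcd (n1 ^ k) (d1 ^ k) = 1 := by
      rw [Int.gcd, Int.natAbs_pow, Int.natAbs_pow]
      exact Nat.pow_gcd_pow_of_gcd_eq_one hcop
    rw [h1, mul_one, Int.natAbs_pow, Int.natAbs_natCast]
  have hsign : ((G : Int) * d1) ^ k < 0 ↔ d1 ^ k < 0 := by
    rw [mul_pow]
    constructor
    · intro h
      by_contra h2
      nlinarith
    · intro h
      exact mul_neg_of_pos_of_neg hGk h
  have hc : ((G ^ k : Nat) : Int) = (G : Int) ^ k := by push_cast; ring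
  rw [simplificar_fraccion, if_neg hdne]
  simp only [mcd_eq_gcd]
  by_cases hneg : d1 ^ k < 0
  · have hneg' : ((G : Int) * d1) ^ k < 0 := hsign.mpr hneg
    simp only [if_pos hneg, if_pos hneg', Int.neg_gcd, Int.gcd_neg, hgk, hc]
    have e1 : -(((G : Int) * n1) ^ k) = (G : Int) ^ k * -(n1 ^ k) := by rw [mul_pow]; ring
    have e2 : -(((G : Int) * d1) ^ k) = (G : Int) ^ k * -(d1 ^ k) := by rw [mul_pow]; ring
    rw [PySem.Int.floordiv_eq_ediv_of_pos hGk, PySem.Int.floordiv_eq_ediv_of_pos hGk,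
      e1, e2, Int.mul_ediv_cancel_left _ (ne_of_gt hGk), Int.mul_ediv_cancel_left _ (ne_of_gt hGk)]
  · have hneg' : ¬ ((G : Int) * d1) ^ k < 0 := fun h => hneg (hsign.mp h)
    simp only [if_neg hneg, if_neg hneg', hgk, hc]
    rw [PySem.Int.floordiv_eq_ediv_of_pos hGk, PySem.Int.floordiv_eq_ediv_of_pos hGk,
      mul_pow, mul_pow, Int.mul_ediv_cancel_left _ (ne_of_gt hGk),
      Int.mul_ediv_cancel_left _ (ne_of_gt hGk)]

-- the algebraic core: simplifying (n^k, d^k) = powering the reduced (n/g, d/g)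
theorem core (n d : Int) (hd : d ≠ 0) (k : Nat) :
    simplificar_fraccion (n ^ k) (d ^ k) =
      (let g := gcdRec (if n ≥ 0 then n else -n) (if d ≥ 0 then d else -d)
       let n1 := PySem.Int.floordiv n g
       let d1 := PySem.Int.floordiv d g
       if d1 ^ k < 0 then [-(n1 ^ k), -(d1 ^ k)] else [n1 ^ k, d1 ^ k]) := by
  have hG0 : Int.gcd n d ≠ 0 := fun h => hd (Int.eq_zero_of_gcd_eq_zero_right h)
  have hGpos : (0 : Int) < ↑(Int.gcd n d) := by exact_mod_cast Nat.pos_of_ne_zero hG0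
  obtain ⟨n1, hn1⟩ : (↑(Int.gcd n d) : Int) ∣ n := Int.gcd_dvd_left n d
  obtain ⟨d1, hd1⟩ : (↑(Int.gcd n d) : Int) ∣ d := Int.gcd_dvd_right n d
  have en : n / ↑(Int.gcd n d) = n1 := by
    have h := Int.mul_ediv_cancel_left (b := n1) (a := (↑(Int.gcd n d) : Int)) (ne_of_gt hGpos)
    rwa [← hn1] at h
  have ed : d / ↑(Int.gcd n d) = d1 := by
    have h := Int.mul_ediv_cancel_left (b := d1) (a := (↑(Int.gcd n d) : Int)) (ne_of_gt hGpos)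
    rwa [← hd1] at h
  have hfn : PySem.Int.floordiv n ↑(Int.gcd n d) = n1 := by
    rw [PySem.Int.floordiv_eq_ediv_of_pos hGpos, en]
  have hfd : PySem.Int.floordiv d ↑(Int.gcd n d) = d1 := by
    rw [PySem.Int.floordiv_eq_ediv_of_pos hGpos, ed]
  have hcop : Int.gcd n1 d1 = 1 := by
    have h := Int.gcd_ediv_gcd_ediv_gcd_of_ne_zero_right (n := n) (m := d) hd
    rwa [en, ed] at h
  have hd1ne : d1 ≠ 0 := by
    intro h
    exact hd (by rw [hd1, h, mul_zero])
  simp only [gcdRec_abs_eq_gcd, hfn, hfd]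
  have hcore := core_aux (Int.gcd n d) (Nat.pos_of_ne_zero hG0) n1 d1 hd1ne hcop k
  rw [← hn1, ← hd1] at hcore
  exact hcore

-- ===== VERDICT (by name: the statement is the Claim_ definition above) =====
theorem potencia_fraccion_spec : Claim_equal_potencia_fraccion := by
  intro a e _hdom hpre
  unfold Spec_potencia_fraccion
  by_cases he : e = 0
  · simp [potencia_fraccion, potencia_fraccion_alt, he]
  · obtain ⟨hlen, h1, h2⟩ := hpre he
    have hg0 : PySem.List.pyGetD a 0 0 = a.getD 0 0 := by
      rw [show (0 : Int) = ((0 : Nat) : Int) by norm_num, PySem.List.pyGetD_natCast]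
    have hg1 : PySem.List.pyGetD a 1 0 = a.getD 1 0 := by
      rw [show (1 : Int) = ((1 : Nat) : Int) by norm_num, PySem.List.pyGetD_natCast]
    rcases lt_trichotomy e 0 with hlt | h0 | hgt
    · -- e < 0: base is (a[1], a[0]); a[0] ≠ 0
      have hd : PySem.List.pyGetD a 0 0 ≠ 0 := by rw [hg0]; exact h2 hlt
      simp only [potencia_fraccion, potencia_fraccion_alt, if_neg he, if_pos hlt,
        if_neg (show ¬ e > 0 by omega), if_neg hd]
      rw [pfLoop_eq_pow (PySem.List.pyGetD a 1 0) (PySem.List.pyGetD a 0 0) e.natAbs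
        (-e) 1 1 0 (by omega)]
      simp only [one_mul]
      exact core (PySem.List.pyGetD a 1 0) (PySem.List.pyGetD a 0 0) hd e.natAbs
    · exact absurd h0 he
    · -- e > 0: base is (a[0], a[1]); a[1] ≠ 0
      have hd : PySem.List.pyGetD a 1 0 ≠ 0 := by rw [hg1]; exact h1 hgt
      simp only [potencia_fraccion, potencia_fraccion_alt, if_neg he,
        if_neg (show ¬ e < 0 by omega), if_pos (show e > 0 from hgt), if_neg hd]
      rw [pfLoop_eq_pow (PySem.List.pyGetD a 0 0) (PySem.List.pyGetD a 1 0) e.natAbs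
        e 1 1 0 (by omega)]
      simp only [one_mul]
      exact core (PySem.List.pyGetD a 0 0) (PySem.List.pyGetD a 1 0) hd e.natAbs
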